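-- pv_equiv track=rewrite | github.com/AxiomAlive/DeveloperPortfolio | hotels/3/B.py | countTens
-- ===== SOURCE A (Python) =====
-- def countTens(twos, threes, fours):
--     tens = 0
--     while fours > 0 or threes > 1 or twos > 0:
--         if fours > 0 and threes > 1:
--             fours -= 1
--             threes -= 2
--         elif fours > 1 and twos > 0:
--             fours -= 2
--             twos -= 1
--         elif threes > 1 and twos > 1:
--             threes -= 2
--             twos -= 2
--         elif fours > 0 and twos > 2:
--             fours -= 1
--             twos -= 3
--         elif twos > 4:
--             twos -= 5
--         else:
--             break
--         tens += 1
--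
--     return tens
-- ===== SOURCE B (Python) =====
-- def countTens(twos, threes, fours):
--     # Batch each greedy rule: once a rule stops applying it never reactivates,
--     # so each rule's repetitions collapse into one min()/floor-division step.
--     tens = 0
--     k = max(0, min(fours, threes // 2))      # rule: 1 four + 2 threes
--     fours -= k; threes -= 2 * k; tens += k
--     k = max(0, min(fours // 2, twos))        # rule: 2 fours + 1 two
--     fours -= 2 * k; twos -= k; tens += k
--     k = max(0, min(threes // 2, twos // 2))  # rule: 2 threes + 2 twos
--     threes -= 2 * k; twos -= 2 * k; tens += k
--     k = max(0, min(fours, twos // 3))        # rule: 1 four + 3 twos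
--     fours -= k; twos -= 3 * k; tens += k
--     tens += max(0, twos // 5)                # rule: 5 twos
--     return tens
-- ===== Notes on version B (the rewrite author's own statement) =====
-- stated objective: faster
-- what changed: Replaced A's one-group-at-a-time greedy while-loop by batching each of the five rules once with min()/floor-division (a rule never reactivates after it stops applying), so the whole count is straight-line arithmetic.
import Mathlib
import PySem

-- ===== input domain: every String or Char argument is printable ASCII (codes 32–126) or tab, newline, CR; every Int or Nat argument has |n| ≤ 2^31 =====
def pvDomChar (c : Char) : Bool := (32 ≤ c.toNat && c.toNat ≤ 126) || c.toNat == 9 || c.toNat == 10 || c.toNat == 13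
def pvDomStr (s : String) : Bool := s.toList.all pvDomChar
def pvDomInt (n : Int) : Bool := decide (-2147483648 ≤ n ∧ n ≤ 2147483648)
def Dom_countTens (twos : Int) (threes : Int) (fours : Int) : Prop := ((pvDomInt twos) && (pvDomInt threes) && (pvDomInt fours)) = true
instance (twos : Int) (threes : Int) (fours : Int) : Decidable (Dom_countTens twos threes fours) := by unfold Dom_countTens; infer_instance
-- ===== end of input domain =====

-- B batches each of A's five greedy rules into one min()/floor-division step (a rule never reactivates once skipped), replacing the loop by straight-line arithmetic.

-- ===== PORT A =====
-- termination measure lemmas for the loop below (cited by name in decreasing_by)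
theorem ctDec1 (t h f : Int) (hc : f > 0 ∧ h > 1) :
    t.toNat + (h - 2).toNat + (f - 1).toNat < t.toNat + h.toNat + f.toNat := by omega
theorem ctDec2 (t h f : Int) (hc : f > 1 ∧ t > 0) :
    (t - 1).toNat + h.toNat + (f - 2).toNat < t.toNat + h.toNat + f.toNat := by omega
theorem ctDec3 (t h f : Int) (hc : h > 1 ∧ t > 1) :
    (t - 2).toNat + (h - 2).toNat + f.toNat < t.toNat + h.toNat + f.toNat := by omega
theorem ctDec4 (t h f : Int) (hc : f > 0 ∧ t > 2) :
    (t - 3).toNat + h.toNat + (f - 1).toNat < t.toNat + h.toNat + f.toNat := by omega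
theorem ctDec5 (t h f : Int) (hc : t > 4) :
    (t - 5).toNat + h.toNat + f.toNat < t.toNat + h.toNat + f.toNat := by omega
-- A's while loop, transcribed as a recursion on the same state (twos, threes, fours, tens).
def countTensLoop (twos : Int) (threes : Int) (fours : Int) (tens : Int) : Int :=
  if fours > 0 ∨ threes > 1 ∨ twos > 0 then
    if hc1 : fours > 0 ∧ threes > 1 then countTensLoop twos (threes - 2) (fours - 1) (tens + 1)
    else if hc2 : fours > 1 ∧ twos > 0 then countTensLoop (twos - 1) threes (fours - 2) (tens + 1)
    else if hc3 : threes > 1 ∧ twos > 1 then countTensLoop (twos - 2) (threes - 2) fours (tens + 1)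
    else if hc4 : fours > 0 ∧ twos > 2 then countTensLoop (twos - 3) threes (fours - 1) (tens + 1)
    else if hc5 : twos > 4 then countTensLoop (twos - 5) threes fours (tens + 1)
    else tens
  else tens
termination_by (twos.toNat + threes.toNat + fours.toNat)
decreasing_by
  · exact ctDec1 twos threes fours hc1
  · exact ctDec2 twos threes fours hc2
  · exact ctDec3 twos threes fours hc3
  · exact ctDec4 twos threes fours hc4
  · exact ctDec5 twos threes fours hc5

def countTens (twos : Int) (threes : Int) (fours : Int) : Int :=
  countTensLoop twos threes fours 0

-- ===== PORT B =====
def countTens_alt (twos : Int) (threes : Int) (fours : Int) : Int :=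
  let k1 := max 0 (min fours (PySem.Int.floordiv threes 2))
  let fours1 := fours - k1
  let threes1 := threes - 2 * k1
  let k2 := max 0 (min (PySem.Int.floordiv fours1 2) twos)
  let fours2 := fours1 - 2 * k2
  let twos2 := twos - k2
  let k3 := max 0 (min (PySem.Int.floordiv threes1 2) (PySem.Int.floordiv twos2 2))
  let twos3 := twos2 - 2 * k3
  let k4 := max 0 (min fours2 (PySem.Int.floordiv twos3 3))
  let twos4 := twos3 - 3 * k4
  k1 + k2 + k3 + k4 + max 0 (PySem.Int.floordiv twos4 5)

-- ===== PRECONDITION & SPEC =====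
def Spec_countTens (twos : Int) (threes : Int) (fours : Int) (out : Int) : Prop := out = countTens_alt twos threes fours
instance (twos : Int) (threes : Int) (fours : Int) (out : Int) : Decidable (Spec_countTens twos threes fours out) := by unfold Spec_countTens; infer_instance

-- ===== CLAIM (what is proved, stated in full; the proofs are below) =====
def Claim_equal_countTens : Prop := ∀ (twos : Int) (threes : Int) (fours : Int), Dom_countTens twos threes fours → Spec_countTens twos threes fours (countTens twos threes fours)

-- ===== LEMMAS AND PROOFS =====

-- B's pipeline as a chain of stages (proof-only restatement of countTens_alt with `/` = Int.ediv).
def s5 (t : Int) : Int := max 0 (t / 5)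
def s4 (t f : Int) : Int := max 0 (min f (t / 3)) + s5 (t - 3 * max 0 (min f (t / 3)))
def s3 (t h f : Int) : Int :=
  max 0 (min (h / 2) (t / 2)) + s4 (t - 2 * max 0 (min (h / 2) (t / 2))) f
def s2 (t h f : Int) : Int :=
  max 0 (min (f / 2) t) + s3 (t - max 0 (min (f / 2) t)) h (f - 2 * max 0 (min (f / 2) t))
def s1 (t h f : Int) : Int :=
  max 0 (min f (h / 2)) + s2 t (h - 2 * max 0 (min f (h / 2))) (f - max 0 (min f (h / 2)))

theorem alt_eq_s1 (t h f : Int) : countTens_alt t h f = s1 t h f := by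
  have d2 : ∀ a : Int, PySem.Int.floordiv a 2 = a / 2 := fun a =>
    PySem.Int.floordiv_eq_ediv_of_pos (by norm_num)
  have d3 : ∀ a : Int, PySem.Int.floordiv a 3 = a / 3 := fun a =>
    PySem.Int.floordiv_eq_ediv_of_pos (by norm_num)
  have d5 : ∀ a : Int, PySem.Int.floordiv a 5 = a / 5 := fun a =>
    PySem.Int.floordiv_eq_ediv_of_pos (by norm_num)
  simp only [countTens_alt, s1, s2, s3, s4, s5, d2, d3, d5]
  ring

theorem s1_case1 (t h f : Int) (hf : f > 0) (hh : h > 1) :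
    s1 t h f = 1 + s1 t (h - 2) (f - 1) := by
  have hd : (h - 2) / 2 = h / 2 - 1 := by omega
  have hk : max 0 (min (f - 1) (h / 2 - 1)) = max 0 (min f (h / 2)) - 1 := by omega
  simp only [s1, hd, hk]
  generalize max 0 (min f (h / 2)) = K
  have e1 : h - 2 - 2 * (K - 1) = h - 2 * K := by ring
  have e2 : f - 1 - (K - 1) = f - K := by ring
  rw [e1, e2]; ring

theorem s1_case2 (t h f : Int) (hc1 : ¬(f > 0 ∧ h > 1)) (hf : f > 1) (ht : t > 0) :
    s1 t h f = 1 + s1 (t - 1) h (f - 2) := by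
  have hk1 : max 0 (min f (h / 2)) = 0 := by omega
  have hk1' : max 0 (min (f - 2) (h / 2)) = 0 := by omega
  simp only [s1, hk1, hk1', mul_zero, sub_zero]
  have hd : (f - 2) / 2 = f / 2 - 1 := by omega
  have hk2 : max 0 (min (f / 2 - 1) (t - 1)) = max 0 (min (f / 2) t) - 1 := by omega
  simp only [s2, hd, hk2]
  generalize max 0 (min (f / 2) t) = K
  have e1 : t - 1 - (K - 1) = t - K := by ring
  have e2 : f - 2 - 2 * (K - 1) = f - 2 * K := by ring
  rw [e1, e2]; ring

theorem s1_case3 (t h f : Int) (hc1 : ¬(f > 0 ∧ h > 1)) (hc2 : ¬(f > 1 ∧ t > 0))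
    (hh : h > 1) (ht : t > 1) :
    s1 t h f = 1 + s1 (t - 2) (h - 2) f := by
  have hf0 : f ≤ 0 := by omega
  have hk1 : max 0 (min f (h / 2)) = 0 := by omega
  have hk1' : max 0 (min f ((h - 2) / 2)) = 0 := by omega
  simp only [s1, hk1, hk1', mul_zero, sub_zero]
  have hk2 : max 0 (min (f / 2) t) = 0 := by omega
  have hk2' : max 0 (min (f / 2) (t - 2)) = 0 := by omega
  simp only [s2, hk2, hk2', mul_zero, sub_zero]
  have hd1 : (h - 2) / 2 = h / 2 - 1 := by omega
  have hd2 : (t - 2) / 2 = t / 2 - 1 := by omega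
  have hk3 : max 0 (min (h / 2 - 1) (t / 2 - 1)) = max 0 (min (h / 2) (t / 2)) - 1 := by omega
  simp only [s3, hd1, hd2, hk3]
  generalize max 0 (min (h / 2) (t / 2)) = K
  have e1 : t - 2 - 2 * (K - 1) = t - 2 * K := by ring
  rw [e1]; ring

theorem s1_case4 (t h f : Int) (_hc1 : ¬(f > 0 ∧ h > 1)) (hc2 : ¬(f > 1 ∧ t > 0))
    (hc3 : ¬(h > 1 ∧ t > 1)) (hf : f > 0) (ht : t > 2) :
    s1 t h f = 1 + s1 (t - 3) h (f - 1) := by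
  have hh : h ≤ 1 := by omega
  have hf1 : f ≤ 1 := by omega
  have hk1 : max 0 (min f (h / 2)) = 0 := by omega
  have hk1' : max 0 (min (f - 1) (h / 2)) = 0 := by omega
  simp only [s1, hk1, hk1', mul_zero, sub_zero]
  have hk2 : max 0 (min (f / 2) t) = 0 := by omega
  have hk2' : max 0 (min ((f - 1) / 2) (t - 3)) = 0 := by omega
  simp only [s2, hk2, hk2', mul_zero, sub_zero]
  have hk3 : max 0 (min (h / 2) (t / 2)) = 0 := by omega
  have hk3' : max 0 (min (h / 2) ((t - 3) / 2)) = 0 := by omega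
  simp only [s3, hk3, hk3', mul_zero, sub_zero]
  have hd : (t - 3) / 3 = t / 3 - 1 := by omega
  have hk4 : max 0 (min (f - 1) (t / 3 - 1)) = max 0 (min f (t / 3)) - 1 := by omega
  simp only [s4, hd, hk4]
  generalize max 0 (min f (t / 3)) = K
  have e1 : t - 3 - 3 * (K - 1) = t - 3 * K := by ring
  rw [e1]; ring

theorem s1_case5 (t h f : Int) (_hc1 : ¬(f > 0 ∧ h > 1)) (_hc2 : ¬(f > 1 ∧ t > 0))
    (hc3 : ¬(h > 1 ∧ t > 1)) (hc4 : ¬(f > 0 ∧ t > 2)) (ht : t > 4) :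
    s1 t h f = 1 + s1 (t - 5) h f := by
  have hf0 : f ≤ 0 := by omega
  have hh : h ≤ 1 := by omega
  have hk1 : max 0 (min f (h / 2)) = 0 := by omega
  simp only [s1, hk1, mul_zero, sub_zero]
  have hk2 : max 0 (min (f / 2) t) = 0 := by omega
  have hk2' : max 0 (min (f / 2) (t - 5)) = 0 := by omega
  simp only [s2, hk2, hk2', mul_zero, sub_zero]
  have hk3 : max 0 (min (h / 2) (t / 2)) = 0 := by omega
  have hk3' : max 0 (min (h / 2) ((t - 5) / 2)) = 0 := by omega
  simp only [s3, hk3, hk3', mul_zero, sub_zero]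
  have hk4 : max 0 (min f (t / 3)) = 0 := by omega
  have hk4' : max 0 (min f ((t - 5) / 3)) = 0 := by omega
  simp only [s4, hk4, hk4', mul_zero, sub_zero]
  have hk5 : max 0 ((t - 5) / 5) = max 0 (t / 5) - 1 := by omega
  simp only [s5, hk5]
  ring

theorem s1_zero (t h f : Int) (hc1 : ¬(f > 0 ∧ h > 1)) (hc2 : ¬(f > 1 ∧ t > 0))
    (hc3 : ¬(h > 1 ∧ t > 1)) (hc4 : ¬(f > 0 ∧ t > 2)) (ht : ¬t > 4) :
    s1 t h f = 0 := by
  have hk1 : max 0 (min f (h / 2)) = 0 := by omega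
  simp only [s1, hk1, mul_zero, sub_zero]
  have hk2 : max 0 (min (f / 2) t) = 0 := by omega
  simp only [s2, hk2, mul_zero, sub_zero]
  have hk3 : max 0 (min (h / 2) (t / 2)) = 0 := by omega
  simp only [s3, hk3, mul_zero, sub_zero]
  have hk4 : max 0 (min f (t / 3)) = 0 := by omega
  simp only [s4, hk4, mul_zero, sub_zero]
  have hk5 : max 0 (t / 5) = 0 := by omega
  simp only [s5, hk5]
  ring

theorem loop_eq_s1 (t h f tens : Int) :
    countTensLoop t h f tens = tens + s1 t h f := by
  induction t, h, f, tens using countTensLoop.induct with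
  | case1 t h f tens hw hc1 ih =>
    rw [countTensLoop, if_pos hw, dif_pos hc1, ih, s1_case1 t h f hc1.1 hc1.2]; ring
  | case2 t h f tens hw hc1 hc2 ih =>
    rw [countTensLoop, if_pos hw, dif_neg hc1, dif_pos hc2, ih, s1_case2 t h f hc1 hc2.1 hc2.2]; ring
  | case3 t h f tens hw hc1 hc2 hc3 ih =>
    rw [countTensLoop, if_pos hw, dif_neg hc1, dif_neg hc2, dif_pos hc3, ih,
      s1_case3 t h f hc1 hc2 hc3.1 hc3.2]; ring
  | case4 t h f tens hw hc1 hc2 hc3 hc4 ih =>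
    rw [countTensLoop, if_pos hw, dif_neg hc1, dif_neg hc2, dif_neg hc3, dif_pos hc4, ih,
      s1_case4 t h f hc1 hc2 hc3 hc4.1 hc4.2]; ring
  | case5 t h f tens hw hc1 hc2 hc3 hc4 hc5 ih =>
    rw [countTensLoop, if_pos hw, dif_neg hc1, dif_neg hc2, dif_neg hc3, dif_neg hc4, dif_pos hc5, ih,
      s1_case5 t h f hc1 hc2 hc3 hc4 hc5]; ring
  | case6 t h f tens hw hc1 hc2 hc3 hc4 hc5 =>
    rw [countTensLoop, if_pos hw, dif_neg hc1, dif_neg hc2, dif_neg hc3, dif_neg hc4, dif_neg hc5,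
      s1_zero t h f hc1 hc2 hc3 hc4 hc5]; ring
  | case7 t h f tens hw =>
    rw [countTensLoop, if_neg hw,
      s1_zero t h f (by omega) (by omega) (by omega) (by omega) (by omega)]; ring

-- ===== VERDICT (by name: the statement is the Claim_ definition above) =====
theorem countTens_spec : Claim_equal_countTens := by
  intro t h f _
  show countTens t h f = countTens_alt t h f
  rw [countTens, loop_eq_s1, alt_eq_s1]; ring
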